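-- pv_equiv track=rewrite | github.com/siinanXD/MaintanaceAIsisst | app/responses.py | error_code_from_message
-- ===== SOURCE A (Python) =====
-- def error_code_from_message(message):
--     """Return a short stable error code from a human-readable message."""
--     text = str(message or "request failed").strip().lower()
--     code = []
--     for character in text:
--         if character.isalnum():
--             code.append(character)
--         elif code and code[-1] != "_":
--             code.append("_")
--     normalized = "".join(code).strip("_")
--     return normalized[:80] or "request_failed"
-- ===== SOURCE B (Python) =====
-- from itertools import groupby
--
--
-- def error_code_from_message(message):
--     """Return a short stable error code from a human-readable message."""
--     text = str(message or "request failed").strip().lower()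
--     tokens = ["".join(group) for is_word, group in groupby(text, key=str.isalnum) if is_word]
--     return "_".join(tokens)[:80] or "request_failed"
-- ===== Notes on version B (the rewrite author's own statement) =====
-- stated objective: idiomatic
-- what changed: B extracts the alnum runs as tokens (groupby-style chunking) and joins them with an underscore separator, instead of A's char-by-char accumulator with last-character bookkeeping followed by a final strip of underscores.
import Mathlib
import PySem

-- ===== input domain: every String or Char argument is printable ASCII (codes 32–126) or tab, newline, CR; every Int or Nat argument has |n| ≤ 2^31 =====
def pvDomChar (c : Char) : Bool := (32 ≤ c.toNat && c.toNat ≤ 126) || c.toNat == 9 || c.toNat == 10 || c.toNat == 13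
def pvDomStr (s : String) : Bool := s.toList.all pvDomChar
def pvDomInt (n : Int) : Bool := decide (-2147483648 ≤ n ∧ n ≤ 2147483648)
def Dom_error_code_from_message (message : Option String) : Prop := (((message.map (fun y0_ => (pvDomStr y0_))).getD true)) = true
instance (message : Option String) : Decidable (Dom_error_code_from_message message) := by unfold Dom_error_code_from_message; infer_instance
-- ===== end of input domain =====

-- B replaces A's char-by-char accumulator (with separator bookkeeping and a final strip) by
-- groupby-style token extraction joined with an underscore separator; objective: more idiomatic, same cost.

-- ===== PORT A =====
-- the loop body of A: append alnum chars; append '_' after a run unless one is already there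
def pvStep (code : List Char) (c : Char) : List Char :=
  if PySem.Chars.isalnum c then code ++ [c]
  else if code ≠ [] ∧ code.getLast? ≠ some '_' then code ++ ['_']  -- code and code[-1] != "_"
  else code

def error_code_from_message (message : Option String) : String :=
  -- text = str(message or "request failed").strip().lower()
  let base : String := match message with
    | none => "request failed"
    | some s => if s = "" then "request failed" else s
  let text := PySem.Str.lower (PySem.Str.strip base)
  let code := text.toList.foldl pvStep []
  -- normalized = "".join(code).strip("_")
  let normalized := PySem.Chars.stripChars code ['_']
  -- return normalized[:80] or "request_failed"
  let r := String.ofList (PySem.Chars.slice normalized none (some 80))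
  if r ≠ "" then r else "request_failed"

-- ===== PORT B =====
-- groupby(text, key=str.isalnum): the maximal alnum runs, in order (non-alnum groups dropped)
def pvTokens (cs : List Char) : List (List Char) :=
  match cs with
  | [] => []
  | c :: rest =>
    if PySem.Chars.isalnum c then
      (c :: rest.takeWhile PySem.Chars.isalnum) :: pvTokens (rest.dropWhile PySem.Chars.isalnum)
    else pvTokens rest
termination_by cs.length
decreasing_by
  · simpa using Nat.lt_succ_of_le (List.length_dropWhile_le PySem.Chars.isalnum rest)
  · simp

def error_code_from_message_alt (message : Option String) : String :=
  let base : String := match message with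
    | none => "request failed"
    | some s => if s = "" then "request failed" else s
  let text := PySem.Str.lower (PySem.Str.strip base)
  -- "_".join(tokens)
  let joined := PySem.Chars.join ['_'] (pvTokens text.toList)
  let r := String.ofList (PySem.Chars.slice joined none (some 80))
  if r ≠ "" then r else "request_failed"

-- ===== PRECONDITION & SPEC =====
def Spec_error_code_from_message (message : Option String) (out : String) : Prop := out = error_code_from_message_alt message
instance (message : Option String) (out : String) : Decidable (Spec_error_code_from_message message out) := by unfold Spec_error_code_from_message; infer_instance

-- ===== CLAIM (what is proved, stated in full; the proofs are below) =====
def Claim_equal_error_code_from_message : Prop := ∀ (message : Option String), Dom_error_code_from_message message → Spec_error_code_from_message message (error_code_from_message message)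

-- ===== LEMMAS AND PROOFS =====

-- state machines describing A's accumulator growth: pvGS = output when the accumulator is empty
-- or ends in '_', pvGW = output when it ends in an alnum char
mutual
def pvGS : List Char → List Char
  | [] => []
  | c :: cs => if PySem.Chars.isalnum c then c :: pvGW cs else pvGS cs
def pvGW : List Char → List Char
  | [] => []
  | c :: cs => if PySem.Chars.isalnum c then c :: pvGW cs else '_' :: pvGS cs
end

theorem pv_alnum_ne_underscore {c : Char} (h : PySem.Chars.isalnum c = true) : c ≠ '_' := by
  intro e; subst e; revert h; decide

theorem pv_foldl_char (cs : List Char) : ∀ acc : List Char,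
    List.foldl pvStep acc cs =
      acc ++ (if acc = [] ∨ acc.getLast? = some '_' then pvGS cs else pvGW cs) := by
  induction cs with
  | nil => intro acc; split <;> simp [pvGS, pvGW]
  | cons c cs ih =>
    intro acc
    rw [List.foldl_cons]
    by_cases hc : PySem.Chars.isalnum c = true
    · have hstep : pvStep acc c = acc ++ [c] := by simp [pvStep, hc]
      rw [hstep, ih]
      have hne : acc ++ [c] ≠ [] := by simp
      have hlast : (acc ++ [c]).getLast? = some c := by simp
      have hcne : c ≠ '_' := pv_alnum_ne_underscore hc
      rw [if_neg (by simp [hne, hlast, hcne])]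
      split <;> simp [pvGS, pvGW, hc]
    · by_cases h2 : acc ≠ [] ∧ acc.getLast? ≠ some '_'
      · have hstep : pvStep acc c = acc ++ ['_'] := by simp only [pvStep, if_neg hc, if_pos h2]
        rw [hstep, ih]
        rw [if_pos (by simp)]
        rw [if_neg (by simp only [not_or]; exact ⟨h2.1, h2.2⟩)]
        simp [pvGW, hc]
      · have hP : acc = [] ∨ acc.getLast? = some '_' := by
          rcases not_and_or.mp h2 with h | h
          · exact Or.inl (not_not.mp h)
          · exact Or.inr (not_not.mp h)
        have hstep : pvStep acc c = acc := by simp only [pvStep, if_neg hc, if_neg h2]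
        rw [hstep, ih, if_pos hP, if_pos hP]
        simp [pvGS, hc]

theorem pv_tokens_wf : ∀ (cs : List Char) (t : List Char), t ∈ pvTokens cs →
    t ≠ [] ∧ ∀ c ∈ t, PySem.Chars.isalnum c = true := by
  intro cs
  induction cs using pvTokens.induct with
  | case1 => intro t ht; simp [pvTokens] at ht
  | case2 c rest hc ih =>
    intro t ht
    rw [pvTokens, if_pos hc] at ht
    rcases List.mem_cons.mp ht with h | h
    · subst h
      refine ⟨by simp, ?_⟩
      intro x hx
      rcases List.mem_cons.mp hx with h | h
      · subst h; exact hc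
      · exact List.mem_takeWhile_imp h
    · exact ih t h
  | case3 c rest hc ih =>
    intro t ht
    rw [pvTokens, if_neg hc] at ht
    exact ih t ht

theorem pv_gw_split (cs : List Char) :
    pvGW cs = cs.takeWhile PySem.Chars.isalnum ++
      (if cs.dropWhile PySem.Chars.isalnum = [] then []
       else '_' :: pvGS (cs.dropWhile PySem.Chars.isalnum)) := by
  induction cs with
  | nil => simp [pvGW]
  | cons c cs ih =>
    by_cases hc : PySem.Chars.isalnum c = true
    · rw [pvGW, if_pos hc, List.takeWhile_cons_of_pos hc, List.dropWhile_cons_of_pos hc, ih]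
      simp
    · rw [pvGW, if_neg hc, List.takeWhile_cons_of_neg hc, List.dropWhile_cons_of_neg hc]
      simp only [List.nil_append, if_neg (List.cons_ne_nil c cs)]
      rw [pvGS, if_neg hc]

theorem pv_gs_join (cs : List Char) :
    pvGS cs = PySem.Chars.join ['_'] (pvTokens cs) ∨
      (pvTokens cs ≠ [] ∧ pvGS cs = PySem.Chars.join ['_'] (pvTokens cs) ++ ['_']) := by
  induction cs using pvTokens.induct with
  | case1 => left; simp [pvGS, pvTokens, PySem.Chars.join, List.intercalate]
  | case2 c rest hc ih =>
    rw [pvTokens, if_pos hc, pvGS, if_pos hc, pv_gw_split]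
    by_cases hd : rest.dropWhile PySem.Chars.isalnum = []
    · rw [if_pos hd, hd]
      left
      simp [pvTokens, PySem.Chars.join, List.intercalate]
    · rw [if_neg hd]
      cases htk : pvTokens (rest.dropWhile PySem.Chars.isalnum) with
      | nil =>
        right
        rcases ih with h | h
        · rw [htk] at h
          simp [PySem.Chars.join, List.intercalate] at h
          refine ⟨by simp, ?_⟩
          rw [h]
          simp [PySem.Chars.join, List.intercalate]
        · exact absurd htk h.1
      | cons t' ts =>
        rw [htk] at ih
        have hcc : PySem.Chars.join ['_'] ((c :: rest.takeWhile PySem.Chars.isalnum) :: t' :: ts) =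
            (c :: rest.takeWhile PySem.Chars.isalnum) ++ ['_'] ++ PySem.Chars.join ['_'] (t' :: ts) := by
          simp [PySem.Chars.join, List.intercalate]
        rcases ih with h | h
        · left; rw [hcc, h]; simp
        · right
          refine ⟨by simp, ?_⟩
          rw [hcc, h.2]; simp
  | case3 c rest hc ih =>
    rw [pvTokens, if_neg hc, pvGS, if_neg hc]
    exact ih

theorem pv_dropWhile_id {p : Char → Bool} (x : List Char)
    (h : ∀ c, x.head? = some c → p c = false) : x.dropWhile p = x := by
  cases x with
  | nil => rfl
  | cons a l => exact List.dropWhile_cons_of_neg (by simp [h a rfl])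

theorem pv_join_ends (ts : List (List Char))
    (hwf : ∀ t ∈ ts, t ≠ [] ∧ ∀ c ∈ t, PySem.Chars.isalnum c = true) :
    (∀ c, (PySem.Chars.join ['_'] ts).head? = some c → PySem.Chars.isalnum c = true) ∧
    (∀ c, (PySem.Chars.join ['_'] ts).getLast? = some c → PySem.Chars.isalnum c = true) ∧
    (ts ≠ [] → PySem.Chars.join ['_'] ts ≠ []) := by
  induction ts with
  | nil => simp [PySem.Chars.join, List.intercalate]
  | cons t ts ih =>
    obtain ⟨ht, hta⟩ := hwf t (List.mem_cons_self ..)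
    cases ts with
    | nil =>
      have hj : PySem.Chars.join ['_'] [t] = t := by simp [PySem.Chars.join, List.intercalate]
      rw [hj]
      refine ⟨fun c hc => hta c (List.mem_of_mem_head? hc), fun c hc => ?_, fun _ => ht⟩
      exact hta c (List.mem_of_getLast? hc)
    | cons t' ts' =>
      obtain ⟨ih1, ih2, ih3⟩ := ih (fun u hu => hwf u (List.mem_cons_of_mem _ hu))
      have hj : PySem.Chars.join ['_'] (t :: t' :: ts') =
          t ++ ['_'] ++ PySem.Chars.join ['_'] (t' :: ts') := by
        simp [PySem.Chars.join, List.intercalate]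
      have hjn : PySem.Chars.join ['_'] (t' :: ts') ≠ [] := ih3 (by simp)
      rw [hj]
      refine ⟨fun c hc => ?_, fun c hc => ?_, fun _ => by simp [ht]⟩
      · obtain ⟨a, l, rfl⟩ := List.exists_cons_of_ne_nil ht
        simp only [List.cons_append, List.head?_cons, Option.some.injEq] at hc
        exact hc ▸ hta a (List.mem_cons_self ..)
      · rw [List.getLast?_append_of_ne_nil _ hjn] at hc
        exact ih2 c hc

theorem pv_strip_gs (cs : List Char) :
    PySem.Chars.stripChars (pvGS cs) ['_'] = PySem.Chars.join ['_'] (pvTokens cs) := by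
  obtain ⟨hh, hl, hne⟩ := pv_join_ends (pvTokens cs) (pv_tokens_wf cs)
  have hpf : ∀ c, PySem.Chars.isalnum c = true → (['_'].contains c) = false := by
    intro c hc
    simp [pv_alnum_ne_underscore hc]
  have d1 : List.dropWhile (fun c => ['_'].contains c) (PySem.Chars.join ['_'] (pvTokens cs)) =
      PySem.Chars.join ['_'] (pvTokens cs) :=
    pv_dropWhile_id _ (fun c hc => hpf c (hh c hc))
  have d2 : List.dropWhile (fun c => ['_'].contains c) (PySem.Chars.join ['_'] (pvTokens cs)).reverse =
      (PySem.Chars.join ['_'] (pvTokens cs)).reverse := by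
    refine pv_dropWhile_id _ (fun c hc => ?_)
    rw [List.head?_reverse] at hc
    exact hpf c (hl c hc)
  rcases pv_gs_join cs with h | ⟨hts, h⟩
  · rw [h]
    simp only [PySem.Chars.stripChars, d1, d2, List.reverse_reverse]
  · rw [h]
    have hjne := hne hts
    have d1' : List.dropWhile (fun c => ['_'].contains c)
        (PySem.Chars.join ['_'] (pvTokens cs) ++ ['_']) =
        PySem.Chars.join ['_'] (pvTokens cs) ++ ['_'] := by
      refine pv_dropWhile_id _ (fun c hc => ?_)
      obtain ⟨a, l, he⟩ := List.exists_cons_of_ne_nil hjne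
      rw [he] at hc
      simp only [List.cons_append, List.head?_cons, Option.some.injEq] at hc
      refine hpf c (hh c ?_)
      rw [he, List.head?_cons, hc]
    simp only [PySem.Chars.stripChars, d1', List.reverse_append, List.reverse_cons,
      List.reverse_nil, List.nil_append, List.singleton_append]
    rw [List.dropWhile_cons_of_pos (by simp), d2, List.reverse_reverse]

theorem pv_main (cs : List Char) :
    PySem.Chars.stripChars (cs.foldl pvStep []) ['_'] = PySem.Chars.join ['_'] (pvTokens cs) := by
  have h := pv_foldl_char cs []
  simp at h
  rw [h]; exact pv_strip_gs cs

-- ===== VERDICT (by name: the statement is the Claim_ definition above) =====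
theorem error_code_from_message_spec : Claim_equal_error_code_from_message := by
  intro message _
  unfold Spec_error_code_from_message error_code_from_message error_code_from_message_alt
  simp only [pv_main]
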